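-- pv_equiv track=rewrite | github.com/nrpatel370/thesis-project | backend/categories.py | categorise_columns
-- ===== SOURCE A (Python) =====
-- def get_default_categories():
--     """Return the default keyword-to-category mapping.
--
--     Each key is a category name; the value is a dict with a `keywords` list.
--     Column matching is case-insensitive and substring-based. A column is placed
--     into the first category whose keyword appears anywhere in the column name.
--     Categories not matched by any keyword fall into the implicit `other` bucket.
--     """
--     return {
--         "assignments": {"keywords": ["hw", "homework", "project", "problem set", "ps"]},
--         # "lab" is intentionally excluded since it is too broad and would match Canvas aggregate
--         # columns like "Lab Total", "Lab Current Score", etc. Use "lab assignment" to target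
--         # only individual scored items. "extra credit" is included so those columns appear
--         # in the labs group and are summed into the numerator; Canvas sets their Points
--         # Possible to 0, so the denominator is unaffected and scores can exceed 100%.
--         "labs": {"keywords": ["assign","lab assignment", "extra credit", "practical", "workshop"]},
--         "exams": {"keywords": ["exam", "midterm", "final", "quiz", "test"]},
--         "attendance": {"keywords": ["attendance", "roll call", "present", "absent"]},
--         "debug_dungeon": {"keywords": ["debug dungeon", "dungeon", "dd week"]},
--         "participation": {"keywords": ["participation", "engagement", "challenge"]},
--         # Aggregate / summary columns exported by Canvas land here so they are never
--         # accidentally included in a calculation bucket.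
--         "final_scores": {"keywords": [
--             "final score", "total score", "course grade", "overall",
--             "lab total", "current score", "current points", "final points",
--         ]},
--         "unposted": {"keywords": ["unposted", "unpublished", "pending"]},
--     }
--
-- def categorise_columns(columns, custom_categories=None):
--     """Assign each column name to exactly one category.
--
--     Args:
--         columns: Ordered list of column name strings from the CSV header row.
--         custom_categories: Optional dict in the same format as get_default_categories().
--             When provided it completely replaces the defaults (the TA's saved config).
--
--     Returns:
--         Dict mapping category name → list of column names. Empty categories are
--         omitted so the caller can iterate only over categories that actually have
--         columns. An implicit ``other`` key collects any columns that did not match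
--         any keyword.
--     """
--     category_defs = custom_categories or get_default_categories()
--     categories = {cat: [] for cat in category_defs.keys()}
--     categories["other"] = []
--
--     for col in columns:
--         lower = col.lower().strip()
--         matched = False
--         for cat_name, cat_config in category_defs.items():
--             keywords = cat_config.get("keywords", [])
--             # First matching category wins. Iteration order determines priority.
--             if any(keyword in lower for keyword in keywords):
--                 categories[cat_name].append(col)
--                 matched = True
--                 break
--         if not matched:
--             categories["other"].append(col)
--
--     # Drop categories with no columns so the frontend only renders populated groups.
--     return {k: v for k, v in categories.items() if v}
-- ===== SOURCE B (Python) =====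
-- def get_default_categories():
--     return {
--         "assignments": {"keywords": ["hw", "homework", "project", "problem set", "ps"]},
--         "labs": {"keywords": ["assign", "lab assignment", "extra credit", "practical", "workshop"]},
--         "exams": {"keywords": ["exam", "midterm", "final", "quiz", "test"]},
--         "attendance": {"keywords": ["attendance", "roll call", "present", "absent"]},
--         "debug_dungeon": {"keywords": ["debug dungeon", "dungeon", "dd week"]},
--         "participation": {"keywords": ["participation", "engagement", "challenge"]},
--         "final_scores": {"keywords": [
--             "final score", "total score", "course grade", "overall",
--             "lab total", "current score", "current points", "final points",
--         ]},
--         "unposted": {"keywords": ["unposted", "unpublished", "pending"]},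
--     }
--
--
-- def categorise_columns(columns, custom_categories=None):
--     """Category-major grouping: pre-normalise every column name once, then for
--     each category (in definition order) sweep the column list and collect the
--     still-unassigned columns one of its keywords occurs in; what is left after
--     all sweeps is the ``other`` bucket. Empty buckets are never created."""
--     defs = custom_categories or get_default_categories()
--     texts = [col.lower().strip() for col in columns]
--     assigned = set()
--     result = {}
--     for name, cfg in defs.items():
--         kws = cfg.get("keywords", [])
--         members = [col for col, text in zip(columns, texts)
--                    if col not in assigned and any(k in text for k in kws)]
--         if members:
--             result[name] = members
--         assigned.update(members)
--     other = [col for col in columns if col not in assigned]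
--     if other:
--         result["other"] = result.get("other", []) + other
--     return result
-- ===== Notes on version B (the rewrite author's own statement) =====
-- stated objective: alternative
-- what changed: Inverts the loop nesting: instead of classifying each column by scanning categories with a matched flag into pre-initialised buckets and filtering empties, B pre-normalises the names once and makes one sweep per category over the column list, maintaining a set of already-assigned columns, creating only populated buckets, with the leftovers becoming 'other'.
import Mathlib
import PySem

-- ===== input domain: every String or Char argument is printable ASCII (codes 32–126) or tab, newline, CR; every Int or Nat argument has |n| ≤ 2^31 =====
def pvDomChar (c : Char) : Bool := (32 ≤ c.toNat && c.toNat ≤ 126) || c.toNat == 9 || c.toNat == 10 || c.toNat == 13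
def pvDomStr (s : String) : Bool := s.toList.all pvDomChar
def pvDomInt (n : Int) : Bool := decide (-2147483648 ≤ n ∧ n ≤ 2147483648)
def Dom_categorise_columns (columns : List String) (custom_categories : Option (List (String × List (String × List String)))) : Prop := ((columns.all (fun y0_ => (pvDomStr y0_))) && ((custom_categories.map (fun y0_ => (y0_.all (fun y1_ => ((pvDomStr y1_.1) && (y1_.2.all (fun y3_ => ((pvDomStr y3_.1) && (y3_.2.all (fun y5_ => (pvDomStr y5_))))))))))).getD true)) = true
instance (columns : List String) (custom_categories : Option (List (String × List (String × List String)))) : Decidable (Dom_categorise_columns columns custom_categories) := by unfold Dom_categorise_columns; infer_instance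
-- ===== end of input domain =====

-- B inverts the loop nesting: the names are normalised once, then one sweep per category collects
-- the still-unassigned matching columns (a maintained assigned-set), leftovers become "other";
-- same results on Pre_ (objective: alternative decomposition, not speed).

-- ===== PORT A =====
def getDefaultCategories : List (String × List (String × List String)) :=
  [("assignments", [("keywords", ["hw", "homework", "project", "problem set", "ps"])]),
   ("labs", [("keywords", ["assign", "lab assignment", "extra credit", "practical", "workshop"])]),
   ("exams", [("keywords", ["exam", "midterm", "final", "quiz", "test"])]),
   ("attendance", [("keywords", ["attendance", "roll call", "present", "absent"])]),
   ("debug_dungeon", [("keywords", ["debug dungeon", "dungeon", "dd week"])]),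
   ("participation", [("keywords", ["participation", "engagement", "challenge"])]),
   ("final_scores", [("keywords", ["final score", "total score", "course grade", "overall",
                                   "lab total", "current score", "current points", "final points"])]),
   ("unposted", [("keywords", ["unposted", "unpublished", "pending"])])]

def categorise_columns (columns : List String) (custom_categories : Option (List (String × List (String × List String)))) : List (String × List String) :=
  -- category_defs = custom_categories or get_default_categories()  (None and the empty dict are falsy)
  let category_defs := match custom_categories with
    | some (p :: rest) => p :: rest
    | _ => getDefaultCategories
  -- categories = {cat: [] for cat in category_defs.keys()}
  let categories : PySem.Dict String (List String) :=
    category_defs.foldl (fun d p => d.insert p.1 []) PySem.Dict.empty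
  -- categories["other"] = []
  let categories := categories.insert "other" []
  -- for col in columns: … first matching category wins (find? = the inner for/break), else "other"
  let categories := columns.foldl (fun cats col =>
    let lower := PySem.Str.strip (PySem.Str.lower col)
    match category_defs.find? (fun p =>
        ((PySem.Dict.mk p.2).getD "keywords" []).any (fun kw => PySem.Str.isIn kw lower)) with
    | some p => cats.modify p.1 [] (fun v => v ++ [col])   -- categories[cat_name].append(col)
    | none => cats.modify "other" [] (fun v => v ++ [col])) categories
  -- return {k: v for k, v in categories.items() if v}
  (categories.items.foldl (fun d p => if p.2.isEmpty then d else d.insert p.1 p.2)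
      PySem.Dict.empty).items

-- ===== PORT B =====
def categorise_columns_alt (columns : List String) (custom_categories : Option (List (String × List (String × List String)))) : List (String × List String) :=
  -- defs = custom_categories or get_default_categories()  (None and the empty dict are falsy)
  let defs := match custom_categories with
    | none => getDefaultCategories
    | some [] => getDefaultCategories
    | some (p :: rest) => p :: rest
  -- texts = [col.lower().strip() for col in columns]
  let texts := columns.map (fun col => PySem.Str.strip (PySem.Str.lower col))
  -- for name, cfg in defs.items(): one sweep per category over zip(columns, texts),
  -- state = (assigned set, result dict); assigned.update(members) after the sweep
  let st := defs.foldl (fun (st : PySem.Set String × PySem.Dict String (List String)) p =>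
      let kws := (PySem.Dict.mk p.2).getD "keywords" []
      let members := ((columns.zip texts).filter (fun ct =>
          !(PySem.Set.contains st.1 ct.1) && kws.any (fun k => PySem.Str.isIn k ct.2))).map
          (fun ct => ct.1)
      let res := if members.isEmpty then st.2 else st.2.insert p.1 members
      (PySem.Set.update st.1 members, res))
    ((PySem.Set.empty : PySem.Set String), (PySem.Dict.empty : PySem.Dict String (List String)))
  -- other = [col for col in columns if col not in assigned]
  let other := columns.filter (fun col => !(PySem.Set.contains st.1 col))
  -- if other: result["other"] = result.get("other", []) + other
  let result := if other.isEmpty then st.2 else st.2.insert "other" (st.2.getD "other" [] ++ other)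
  result.items

-- ===== PRECONDITION & SPEC =====
-- Pre_ excludes custom category dicts whose assoc list has duplicate category names (such a list
-- represents no Python dict, so A's first-match behaviour on it is an artefact of the encoding)
-- and custom dicts containing the key "other" (there A accidentally interleaves that category's
-- keyword matches with the unmatched columns — an unspecified corner where B keeps them apart).
def Pre_categorise_columns (columns : List String) (custom_categories : Option (List (String × List (String × List String)))) : Prop :=
  ((custom_categories.getD []).map Prod.fst).Nodup ∧
    "other" ∉ (custom_categories.getD []).map Prod.fst
instance (columns : List String) (custom_categories : Option (List (String × List (String × List String)))) : Decidable (Pre_categorise_columns columns custom_categories) := by unfold Pre_categorise_columns; infer_instance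

def pvWitness_categorise_columns : List String × (Option (List (String × List (String × List String)))) :=
  (["HW 1", "Final Exam"], some [("assignments", [("keywords", ["hw"])]), ("exams", [("keywords", ["exam"])])])

def Spec_categorise_columns (columns : List String) (custom_categories : Option (List (String × List (String × List String)))) (out : List (String × List String)) : Prop := out = categorise_columns_alt columns custom_categories
instance (columns : List String) (custom_categories : Option (List (String × List (String × List String)))) (out : List (String × List String)) : Decidable (Spec_categorise_columns columns custom_categories out) := by unfold Spec_categorise_columns; infer_instance

-- ===== CLAIM (what is proved, stated in full; the proofs are below) =====
def Claim_equal_categorise_columns : Prop := ∀ (columns : List String) (custom_categories : Option (List (String × List (String × List String)))), Dom_categorise_columns columns custom_categories → Pre_categorise_columns columns custom_categories → Spec_categorise_columns columns custom_categories (categorise_columns columns custom_categories)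

-- ===== LEMMAS AND PROOFS =====

-- does column col match category entry p?  (shared vocabulary of the two proofs)
def matchesP (p : String × List (String × List String)) (col : String) : Bool :=
  ((PySem.Dict.mk p.2).getD "keywords" []).any
    (fun kw => PySem.Str.isIn kw (PySem.Str.strip (PySem.Str.lower col)))

-- the category name A's inner loop assigns to col
def clsFn (defs : List (String × List (String × List String))) (col : String) : String :=
  match defs.find? (fun p => matchesP p col) with
  | some p => p.1
  | none => "other"

-- the bucket of columns the whole run assigns to name k
def filt (defs : List (String × List (String × List String))) (columns : List String) (k : String) : List String :=
  columns.filter (fun c => clsFn defs c == k)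

-- the bucket of columns whose first matching entry is p itself
def bucket (defs : List (String × List (String × List String))) (columns : List String)
    (p : String × List (String × List String)) : List String :=
  columns.filter (fun c => defs.find? (fun q => matchesP q c) == some p)

-- general fold shapes used by both characterisations
lemma foldl_if_insert (l : List (String × List String)) (d : PySem.Dict String (List String)) :
    l.foldl (fun d p => if p.2.isEmpty then d else d.insert p.1 p.2) d
      = (l.filter (fun p => !p.2.isEmpty)).foldl (fun d p => d.insert p.1 p.2) d := by
  induction l generalizing d with
  | nil => rfl
  | cons x xs ih =>
    cases hx : x.2.isEmpty <;>
      simp only [List.foldl_cons, List.filter_cons, hx, Bool.not_true, Bool.not_false,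
        Bool.false_eq_true, if_true, if_false] <;>
      exact ih _

lemma items_foldl_insert_ofList {κ ν : Type} [BEq κ] [LawfulBEq κ] (f : κ → ν) (ks : List κ) :
    (ks.foldl (fun d k => d.insert k (f k)) PySem.Dict.empty).items
      = (PySem.Set.ofList ks).map (fun k => (k, f k)) := by
  induction ks using List.reverseRecOn with
  | nil => rfl
  | append_singleton ks k ih =>
    rw [List.foldl_append, List.foldl_cons, List.foldl_nil, PySem.Set.ofList_append_singleton]
    have hkeys : (ks.foldl (fun d k => d.insert k (f k)) PySem.Dict.empty).keys
        = PySem.Set.ofList ks := by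
      rw [PySem.Dict.keys_foldl_insert ks (fun _ k => f k) PySem.Dict.empty,
        PySem.Dict.keys_empty, PySem.Set.update_nil_left]
    rw [PySem.Dict.items_insert]
    by_cases hk : k ∈ ks
    · have hc : (ks.foldl (fun d k => d.insert k (f k)) PySem.Dict.empty).contains k = true := by
        rw [PySem.Dict.contains_iff_mem_keys, hkeys]
        exact (PySem.Set.mem_ofList ks k).mpr hk
      rw [if_pos hc, ih, PySem.Set.add_of_mem ((PySem.Set.mem_ofList ks k).mpr hk), List.map_map]
      refine List.map_congr_left (fun a _ => ?_)
      by_cases ha : a = k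
      · subst ha; simp
      · simp [ha]
    · have hc : (ks.foldl (fun d k => d.insert k (f k)) PySem.Dict.empty).contains k = false := by
        rw [← Bool.not_eq_true, PySem.Dict.contains_iff_mem_keys, hkeys, PySem.Set.mem_ofList]
        exact hk
      rw [hc, ih, PySem.Set.add_of_not_mem (fun h => hk ((PySem.Set.mem_ofList ks k).mp h))]
      simp

lemma clsFn_mem (defs : List (String × List (String × List String))) (col : String) :
    clsFn defs col ∈ (PySem.Set.ofList (defs.map Prod.fst)).add "other" := by
  unfold clsFn
  cases h : defs.find? (fun p => matchesP p col) with
  | none => exact (PySem.Set.mem_add _ _ _).mpr (Or.inr rfl)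
  | some p =>
    refine (PySem.Set.mem_add _ _ _).mpr (Or.inl ?_)
    rw [PySem.Set.mem_ofList]
    exact List.mem_map.mpr ⟨p, List.mem_of_find?_eq_some h, rfl⟩

-- A's per-column body IS "modify the bucket clsFn picks"
lemma Astep (defs : List (String × List (String × List String)))
    (cats : PySem.Dict String (List String)) (col : String) :
    (match defs.find? (fun p =>
        ((PySem.Dict.mk p.2).getD "keywords" []).any
          (fun kw => PySem.Str.isIn kw (PySem.Str.strip (PySem.Str.lower col)))) with
     | some p => cats.modify p.1 [] (fun v => v ++ [col])
     | none => cats.modify "other" [] (fun v => v ++ [col]))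
    = cats.modify (clsFn defs col) [] (fun v => v ++ [col]) := by
  unfold clsFn matchesP
  cases h : defs.find? (fun p =>
      ((PySem.Dict.mk p.2).getD "keywords" []).any
        (fun kw => PySem.Str.isIn kw (PySem.Str.strip (PySem.Str.lower col)))) with
  | none => rfl
  | some p => rfl

-- characterisation of A's whole run
lemma A_char (defs : List (String × List (String × List String))) (columns : List String) :
    (((columns.foldl (fun cats col =>
        let lower := PySem.Str.strip (PySem.Str.lower col)
        match defs.find? (fun p =>
            ((PySem.Dict.mk p.2).getD "keywords" []).any (fun kw => PySem.Str.isIn kw lower)) with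
        | some p => cats.modify p.1 [] (fun v => v ++ [col])
        | none => cats.modify "other" [] (fun v => v ++ [col]))
        ((defs.foldl (fun d p => d.insert p.1 []) PySem.Dict.empty).insert "other" [])).items.foldl
        (fun d p => if p.2.isEmpty then d else d.insert p.1 p.2) PySem.Dict.empty).items)
    = (((PySem.Set.ofList (defs.map Prod.fst)).add "other").filter
        (fun k => !(filt defs columns k).isEmpty)).map (fun k => (k, filt defs columns k)) := by
  have hfold : (fun (cats : PySem.Dict String (List String)) (col : String) =>
      let lower := PySem.Str.strip (PySem.Str.lower col)
      match defs.find? (fun p =>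
          ((PySem.Dict.mk p.2).getD "keywords" []).any (fun kw => PySem.Str.isIn kw lower)) with
      | some p => cats.modify p.1 [] (fun v => v ++ [col])
      | none => cats.modify "other" [] (fun v => v ++ [col]))
      = (fun cats col => cats.modify (clsFn defs col) [] (fun v => v ++ [col])) :=
    funext fun cats => funext fun col => Astep defs cats col
  rw [hfold]
  set names : List String := defs.map Prod.fst with hnames
  set K : List String := (PySem.Set.ofList names).add "other" with hK
  have hcat1 : (defs.foldl (fun d p => d.insert p.1 []) PySem.Dict.empty).insert "other" []
      = (names ++ ["other"]).foldl (fun d k => d.insert k ([] : List String)) PySem.Dict.empty := by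
    rw [List.foldl_append, List.foldl_cons, List.foldl_nil, hnames, List.foldl_map]
  set cat1 : PySem.Dict String (List String) :=
    (defs.foldl (fun d p => d.insert p.1 []) PySem.Dict.empty).insert "other" [] with hc1
  have hitems1 : cat1.items = K.map (fun k => (k, ([] : List String))) := by
    rw [hcat1, items_foldl_insert_ofList (fun _ => ([] : List String)),
      PySem.Set.ofList_append_singleton]
  have hkeys1 : cat1.keys = K := by
    have : cat1.keys = cat1.items.map (fun p => p.1) := rfl
    rw [this, hitems1, List.map_map]
    have hid : ((fun p : String × List String => p.1) ∘ fun k => (k, ([] : List String))) = id := rfl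
    rw [hid, List.map_id]
  have hnodupK : K.Nodup := PySem.Set.nodup_add _ _ (PySem.Set.nodup_ofList names)
  have hmemK : ∀ c : String, clsFn defs c ∈ K := fun c => clsFn_mem defs c
  set cat2 : PySem.Dict String (List String) :=
    columns.foldl (fun cats col => cats.modify (clsFn defs col) [] (fun v => v ++ [col])) cat1
    with hc2
  have hkeys2 : cat2.keys = K := by
    rw [hc2, PySem.Dict.keys_foldl_modify_key columns (clsFn defs) [] (fun _ col v => v ++ [col]) cat1,
      hkeys1, PySem.Set.update_eq_append_filter]
    have hnil : (PySem.Set.ofList (columns.map (clsFn defs))).filter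
        (fun y => !PySem.Set.contains K y) = [] := by
      rw [List.filter_eq_nil_iff]
      intro a ha
      have hmem : a ∈ columns.map (clsFn defs) := (PySem.Set.mem_ofList _ _).mp ha
      rcases List.mem_map.mp hmem with ⟨c, _, hac⟩
      have haK : a ∈ K := by rw [← hac]; exact hmemK c
      have hct : PySem.Set.contains K a = true := (PySem.Set.contains_iff K a).mpr haK
      rw [hct]
      simp
    rw [hnil, List.append_nil]
  have hnodup2 : cat2.keys.Nodup := by rw [hkeys2]; exact hnodupK
  have hgetD1 : ∀ k : String, cat1.getD k [] = [] := by
    intro k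
    by_cases hk : cat1.contains k = true
    · have : k ∈ K := by rw [← hkeys1]; exact (PySem.Dict.contains_iff_mem_keys cat1 k).mp hk
      have hmem : (k, ([] : List String)) ∈ cat1.items := by
        rw [hitems1]; exact List.mem_map.mpr ⟨k, this, rfl⟩
      exact PySem.Dict.getD_of_mem_items cat1 hmem (hkeys1 ▸ hnodupK) []
    · exact PySem.Dict.getD_of_not_contains cat1 [] (by simpa using hk)
  have hgetD2 : ∀ k : String, cat2.getD k [] = filt defs columns k := by
    intro k
    have hmap : columns.foldl (fun cats col => cats.modify (clsFn defs col) [] (fun v => v ++ [col])) cat1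
        = (columns.map (fun c => (clsFn defs c, c))).foldl
            (fun d p => d.modify p.1 [] (fun v => v ++ [p.2])) cat1 := by
      rw [List.foldl_map]
    rw [hc2, hmap, PySem.Dict.getD_foldl_modify_append, hgetD1 k, List.nil_append]
    unfold filt
    rw [List.filter_map, List.map_map]
    have h1 : ((fun p : String × String => p.2) ∘ fun c => (clsFn defs c, c)) = id := rfl
    have h2 : ((fun p : String × String => p.1 == k) ∘ fun c => (clsFn defs c, c))
        = fun c => clsFn defs c == k := rfl
    rw [h1, h2, List.map_id]
  have hitems2 : cat2.items = K.map (fun k => (k, filt defs columns k)) := by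
    rw [PySem.Dict.items_eq_map_keys cat2 hnodup2 [], hkeys2]
    exact List.map_congr_left fun k _ => by rw [hgetD2 k]
  rw [foldl_if_insert, hitems2, List.filter_map]
  have hq : (K.filter ((fun p : String × List String => !p.2.isEmpty) ∘
        fun k => (k, filt defs columns k)))
      = K.filter (fun k => !(filt defs columns k).isEmpty) := rfl
  rw [hq]
  have hfresh := PySem.Dict.items_foldl_insert_fresh
    (l := (K.filter (fun k => !(filt defs columns k).isEmpty)).map
      (fun k => (k, filt defs columns k)))
    (k := fun p : String × List String => p.1) (v := fun p : String × List String => p.2)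
    (d := PySem.Dict.empty)
    (fun a _ => PySem.Dict.contains_empty a.1)
    (by rw [List.map_map]
        have hid : ((fun p : String × List String => p.1) ∘ fun k => (k, filt defs columns k))
            = id := rfl
        rw [hid, List.map_id]
        exact hnodupK.filter _)
  rw [hfresh]
  have h0 : (PySem.Dict.empty : PySem.Dict String (List String)).items = [] := rfl
  rw [h0, List.nil_append, List.map_map]
  exact List.map_congr_left fun a _ => rfl

-- ---- B side ----
lemma any_eq_find?_isSome {α : Type} (l : List α) (f : α → Bool) :
    l.any f = (l.find? f).isSome := by
  rw [Bool.eq_iff_iff]; simp [List.find?_isSome, List.any_eq_true]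

lemma zip_map_self {α β : Type} (l : List α) (f : α → β) :
    l.zip (l.map f) = l.map (fun a => (a, f a)) := by
  induction l with
  | nil => rfl
  | cons x xs ih => simp [ih]

-- B's per-category sweep (the literal loop body of the port, as a named function)
def bStep (columns texts : List String)
    (st : PySem.Set String × PySem.Dict String (List String))
    (p : String × List (String × List String)) :
    PySem.Set String × PySem.Dict String (List String) :=
  let kws := (PySem.Dict.mk p.2).getD "keywords" []
  let members := ((columns.zip texts).filter (fun ct =>
      !(PySem.Set.contains st.1 ct.1) && kws.any (fun k => PySem.Str.isIn k ct.2))).map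
      (fun ct => ct.1)
  let res := if members.isEmpty then st.2 else st.2.insert p.1 members
  (PySem.Set.update st.1 members, res)

lemma members_eq (columns : List String) (s : PySem.Set String)
    (p : String × List (String × List String)) :
    (((columns.zip (columns.map (fun col => PySem.Str.strip (PySem.Str.lower col)))).filter
        (fun ct => !(PySem.Set.contains s ct.1) &&
          ((PySem.Dict.mk p.2).getD "keywords" []).any (fun k => PySem.Str.isIn k ct.2))).map
        (fun ct => ct.1))
    = columns.filter (fun c => !(PySem.Set.contains s c) && matchesP p c) := by
  rw [zip_map_self, List.filter_map, List.map_map]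
  have h2 : ((fun ct : String × String => ct.1) ∘
      fun c => (c, PySem.Str.strip (PySem.Str.lower c))) = id := rfl
  rw [h2, List.map_id]
  rfl

lemma bucket_snoc_prefix (columns : List String)
    (ds : List (String × List (String × List String))) (p q : String × List (String × List String))
    (hp : p.1 ∉ ds.map Prod.fst) (hq : q ∈ ds) :
    bucket (ds ++ [p]) columns q = bucket ds columns q := by
  unfold bucket
  refine List.filter_congr (fun c _ => ?_)
  rw [List.find?_append]
  cases h : ds.find? (fun r => matchesP r c) with
  | some r => rfl
  | none =>
    have hpq : p ≠ q := fun e => hp (e ▸ List.mem_map.mpr ⟨q, hq, rfl⟩)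
    rw [Option.none_or]
    by_cases hm : matchesP p c = true
    · rw [show List.find? (fun r => matchesP r c) [p] = some p from List.find?_cons_of_pos hm,
        show ((none : Option (String × List (String × List String))) == some q) = false from rfl,
        beq_eq_false_iff_ne]
      simp [hpq]
    · rw [show List.find? (fun r => matchesP r c) [p] = none by
        rw [List.find?_cons_of_neg (by simpa using hm)]; rfl]

lemma bucket_snoc_self (columns : List String)
    (ds : List (String × List (String × List String))) (p : String × List (String × List String))
    (hp : p.1 ∉ ds.map Prod.fst) :
    bucket (ds ++ [p]) columns p
      = columns.filter (fun c => !(ds.any (fun q => matchesP q c)) && matchesP p c) := by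
  unfold bucket
  refine List.filter_congr (fun c _ => ?_)
  rw [List.find?_append, any_eq_find?_isSome]
  cases h : ds.find? (fun r => matchesP r c) with
  | some r =>
    have hr : r ∈ ds := List.mem_of_find?_eq_some h
    have hrp : r ≠ p := fun e => hp (e ▸ List.mem_map.mpr ⟨r, hr, rfl⟩)
    simp only [Option.some_or, Option.isSome_some, Bool.not_true, Bool.false_and]
    rw [Bool.eq_iff_iff]
    simp [beq_iff_eq, hrp]
  | none =>
    simp only [Option.none_or, Option.isSome_none, Bool.not_false, Bool.true_and]
    by_cases hm : matchesP p c = true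
    · rw [show List.find? (fun r => matchesP r c) [p] = some p from List.find?_cons_of_pos hm, hm]
      simp
    · rw [show List.find? (fun r => matchesP r c) [p] = none by
        rw [List.find?_cons_of_neg (by simpa using hm)]; rfl]
      simp [hm]

lemma Bfold (columns : List String) (ds : List (String × List (String × List String)))
    (hnd : (ds.map Prod.fst).Nodup) :
    (∀ c : String,
        PySem.Set.contains
          (ds.foldl (bStep columns (columns.map (fun col => PySem.Str.strip (PySem.Str.lower col))))
            ((PySem.Set.empty : PySem.Set String),
             (PySem.Dict.empty : PySem.Dict String (List String)))).1 c
          = (columns.contains c && ds.any (fun p => matchesP p c)))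
    ∧ (ds.foldl (bStep columns (columns.map (fun col => PySem.Str.strip (PySem.Str.lower col))))
          ((PySem.Set.empty : PySem.Set String),
           (PySem.Dict.empty : PySem.Dict String (List String)))).2.items
        = (ds.filter (fun p => !(bucket ds columns p).isEmpty)).map
            (fun p => (p.1, bucket ds columns p)) := by
  induction ds using List.reverseRecOn with
  | nil =>
    constructor
    · intro c; simp [PySem.Set.empty, PySem.Set.contains]
    · rfl
  | append_singleton ds p ih =>
    have hnd' : (ds.map Prod.fst).Nodup := by
      rw [List.map_append] at hnd; exact hnd.sublist (List.sublist_append_left _ _)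
    have hp : p.1 ∉ ds.map Prod.fst := by
      have hnd2 : (ds.map Prod.fst ++ [p.1]).Nodup := by simpa using hnd
      intro hmem
      rcases List.nodup_append.mp hnd2 with ⟨-, -, hdisj⟩
      exact hdisj p.1 hmem p.1 (by simp) rfl
    obtain ⟨ih1, ih2⟩ := ih hnd'
    rw [List.foldl_append, List.foldl_cons, List.foldl_nil]
    set S := ds.foldl (bStep columns (columns.map (fun col => PySem.Str.strip (PySem.Str.lower col))))
        ((PySem.Set.empty : PySem.Set String),
         (PySem.Dict.empty : PySem.Dict String (List String))) with hS
    have hmemb : ((columns.zip (columns.map (fun col => PySem.Str.strip (PySem.Str.lower col)))).filter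
        (fun ct => !(PySem.Set.contains S.1 ct.1) &&
          ((PySem.Dict.mk p.2).getD "keywords" []).any (fun k => PySem.Str.isIn k ct.2))).map
        (fun ct => ct.1)
        = bucket (ds ++ [p]) columns p := by
      rw [members_eq, bucket_snoc_self columns ds p hp]
      refine List.filter_congr (fun c hc => ?_)
      rw [ih1 c]
      have hcc : columns.contains c = true := by simpa using hc
      simp [hc]
    have hkeys : ∀ k : String, S.2.contains k = true → k ∈ ds.map Prod.fst := by
      intro k hk
      rw [PySem.Dict.contains_iff_mem_keys] at hk
      have hkeq : S.2.keys = S.2.items.map Prod.fst := rfl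
      rw [hkeq, ih2, List.map_map] at hk
      rcases List.mem_map.mp hk with ⟨q, hq, hqk⟩
      exact List.mem_map.mpr ⟨q, (List.mem_filter.mp hq).1, hqk⟩
    have hfresh : S.2.contains p.1 = false := by
      rw [← Bool.not_eq_true]
      intro hk
      exact hp (hkeys p.1 hk)
    have hds_filter : ds.filter (fun q => !(bucket (ds ++ [p]) columns q).isEmpty)
        = ds.filter (fun q => !(bucket ds columns q).isEmpty) :=
      List.filter_congr (fun q hq => by rw [bucket_snoc_prefix columns ds p q hp hq])
    have hds_map : (ds.filter (fun q => !(bucket ds columns q).isEmpty)).map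
          (fun q => (q.1, bucket (ds ++ [p]) columns q))
        = (ds.filter (fun q => !(bucket ds columns q).isEmpty)).map
          (fun q => (q.1, bucket ds columns q)) :=
      List.map_congr_left (fun q hq => by
        rw [bucket_snoc_prefix columns ds p q hp (List.mem_filter.mp hq).1])
    dsimp only [bStep]
    rw [hmemb]
    constructor
    · intro c
      rw [Bool.eq_iff_iff, PySem.Set.contains_iff, PySem.Set.mem_update]
      have hS1 : c ∈ S.1 ↔ (c ∈ columns ∧ ds.any (fun q => matchesP q c) = true) := by
        rw [← PySem.Set.contains_iff, ih1 c]
        simp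
      have hBk : c ∈ bucket (ds ++ [p]) columns p
          ↔ (c ∈ columns ∧ ds.any (fun q => matchesP q c) = false ∧ matchesP p c = true) := by
        rw [bucket_snoc_self columns ds p hp, List.mem_filter]
        simp
      rw [hS1, hBk]
      simp only [List.any_append, List.any_cons, List.any_nil, Bool.or_false, Bool.and_eq_true,
        Bool.or_eq_true]
      constructor
      · rintro (⟨hc, ha⟩ | ⟨hc, _, hm⟩)
        · exact ⟨by simpa using hc, Or.inl ha⟩
        · exact ⟨by simpa using hc, Or.inr hm⟩
      · rintro ⟨hc, ha | hm⟩
        · exact Or.inl ⟨by simpa using hc, ha⟩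
        · by_cases hda : ds.any (fun q => matchesP q c) = true
          · exact Or.inl ⟨by simpa using hc, hda⟩
          · exact Or.inr ⟨by simpa using hc, by simpa using hda, hm⟩
    · rw [List.filter_append, List.map_append, hds_filter, hds_map, ← ih2]
      cases hE : (bucket (ds ++ [p]) columns p).isEmpty with
      | true =>
        rw [if_pos rfl, List.filter_cons, List.filter_nil, hE]
        simp
      | false =>
        rw [if_neg (by simp), PySem.Dict.items_insert_of_not_contains S.2 _ hfresh,
          List.filter_cons, List.filter_nil, hE]
        simp

lemma clsFn_other (defs : List (String × List (String × List String)))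
    (hoth : "other" ∉ defs.map Prod.fst) (c : String) :
    (clsFn defs c == "other") = !(defs.any (fun q => matchesP q c)) := by
  unfold clsFn
  rw [any_eq_find?_isSome]
  cases h : defs.find? (fun p => matchesP p c) with
  | none => rfl
  | some q =>
    have hq : q ∈ defs := List.mem_of_find?_eq_some h
    have hne : q.1 ≠ "other" := fun e => hoth (e ▸ List.mem_map.mpr ⟨q, hq, rfl⟩)
    simp [hne]

lemma bucket_eq_filt (defs : List (String × List (String × List String))) (columns : List String)
    (hnd : (defs.map Prod.fst).Nodup) (hoth : "other" ∉ defs.map Prod.fst)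
    (p : String × List (String × List String)) (hp : p ∈ defs) :
    bucket defs columns p = filt defs columns p.1 := by
  unfold bucket filt
  refine List.filter_congr (fun c _ => ?_)
  unfold clsFn
  cases h : defs.find? (fun q => matchesP q c) with
  | none =>
    have hne : "other" ≠ p.1 := fun e => hoth (e ▸ List.mem_map.mpr ⟨p, hp, rfl⟩)
    simp [hne]
  | some q =>
    have hq : q ∈ defs := List.mem_of_find?_eq_some h
    by_cases hqp : q = p
    · subst hqp; simp
    · have h1 : (some q == some p) = false := beq_eq_false_iff_ne.mpr (by simp [hqp])
      have h2 : (q.1 == p.1) = false := beq_eq_false_iff_ne.mpr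
        (fun e => hqp (List.inj_on_of_nodup_map hnd hq hp e))
      rw [h1, h2]

-- the whole equivalence, for a fixed resolved category list
lemma core (defs : List (String × List (String × List String))) (columns : List String)
    (hnd : (defs.map Prod.fst).Nodup) (hoth : "other" ∉ defs.map Prod.fst) :
    (((columns.foldl (fun cats col =>
        let lower := PySem.Str.strip (PySem.Str.lower col)
        match defs.find? (fun p =>
            ((PySem.Dict.mk p.2).getD "keywords" []).any (fun kw => PySem.Str.isIn kw lower)) with
        | some p => cats.modify p.1 [] (fun v => v ++ [col])
        | none => cats.modify "other" [] (fun v => v ++ [col]))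
        ((defs.foldl (fun d p => d.insert p.1 []) PySem.Dict.empty).insert "other" [])).items.foldl
        (fun d p => if p.2.isEmpty then d else d.insert p.1 p.2) PySem.Dict.empty).items)
    = (let texts := columns.map (fun col => PySem.Str.strip (PySem.Str.lower col))
       let st := defs.foldl (fun (st : PySem.Set String × PySem.Dict String (List String)) p =>
           let kws := (PySem.Dict.mk p.2).getD "keywords" []
           let members := ((columns.zip texts).filter (fun ct =>
               !(PySem.Set.contains st.1 ct.1) && kws.any (fun k => PySem.Str.isIn k ct.2))).map
               (fun ct => ct.1)
           let res := if members.isEmpty then st.2 else st.2.insert p.1 members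
           (PySem.Set.update st.1 members, res))
         ((PySem.Set.empty : PySem.Set String), (PySem.Dict.empty : PySem.Dict String (List String)))
       let other := columns.filter (fun col => !(PySem.Set.contains st.1 col))
       let result := if other.isEmpty then st.2
         else st.2.insert "other" (st.2.getD "other" [] ++ other)
       result.items) := by
  rw [A_char defs columns,
    show PySem.Set.ofList (defs.map Prod.fst) = defs.map Prod.fst from
      PySem.Set.ofList_eq_self_of_nodup _ hnd,
    show PySem.Set.add (defs.map Prod.fst) "other" = defs.map Prod.fst ++ ["other"] from
      PySem.Set.add_of_not_mem hoth]
  show _ = (if (columns.filter (fun col => !(PySem.Set.contains (defs.foldl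
      (bStep columns (columns.map (fun col => PySem.Str.strip (PySem.Str.lower col))))
      ((PySem.Set.empty : PySem.Set String),
       (PySem.Dict.empty : PySem.Dict String (List String)))).1 col))).isEmpty
    then (defs.foldl (bStep columns (columns.map (fun col => PySem.Str.strip (PySem.Str.lower col))))
      ((PySem.Set.empty : PySem.Set String),
       (PySem.Dict.empty : PySem.Dict String (List String)))).2
    else (defs.foldl (bStep columns (columns.map (fun col => PySem.Str.strip (PySem.Str.lower col))))
      ((PySem.Set.empty : PySem.Set String),
       (PySem.Dict.empty : PySem.Dict String (List String)))).2.insert "other"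
      ((defs.foldl (bStep columns (columns.map (fun col => PySem.Str.strip (PySem.Str.lower col))))
        ((PySem.Set.empty : PySem.Set String),
         (PySem.Dict.empty : PySem.Dict String (List String)))).2.getD "other" []
        ++ columns.filter (fun col => !(PySem.Set.contains (defs.foldl
          (bStep columns (columns.map (fun col => PySem.Str.strip (PySem.Str.lower col))))
          ((PySem.Set.empty : PySem.Set String),
           (PySem.Dict.empty : PySem.Dict String (List String)))).1 col)))).items
  obtain ⟨h1, h2⟩ := Bfold columns defs hnd
  set St := defs.foldl (bStep columns (columns.map (fun col => PySem.Str.strip (PySem.Str.lower col))))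
      ((PySem.Set.empty : PySem.Set String),
       (PySem.Dict.empty : PySem.Dict String (List String))) with hSt
  have hother : columns.filter (fun col => !(PySem.Set.contains St.1 col))
      = filt defs columns "other" := by
    unfold filt
    refine List.filter_congr (fun c hc => ?_)
    have hcc : columns.contains c = true := by simpa using hc
    rw [h1 c, hcc, Bool.true_and, ← clsFn_other defs hoth c]
  have hcont : St.2.contains "other" = false := by
    rw [← Bool.not_eq_true]
    intro hk
    rw [PySem.Dict.contains_iff_mem_keys] at hk
    have hkeq : St.2.keys = St.2.items.map Prod.fst := rfl
    rw [hkeq, h2, List.map_map] at hk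
    rcases List.mem_map.mp hk with ⟨q, hq, hqk⟩
    exact hoth (hqk ▸ List.mem_map.mpr ⟨q, (List.mem_filter.mp hq).1, rfl⟩)
  have hgd : St.2.getD "other" [] = [] := PySem.Dict.getD_of_not_contains St.2 [] hcont
  have hitems : St.2.items = ((defs.map Prod.fst).filter
      (fun k => !(filt defs columns k).isEmpty)).map (fun k => (k, filt defs columns k)) := by
    rw [h2, List.filter_map, List.map_map]
    have hf : defs.filter (fun p => !(bucket defs columns p).isEmpty)
        = defs.filter ((fun k => !(filt defs columns k).isEmpty) ∘ Prod.fst) :=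
      List.filter_congr (fun p hp => by
        rw [show ((fun k => !(filt defs columns k).isEmpty) ∘ Prod.fst) p
            = !(filt defs columns p.1).isEmpty from rfl,
          ← bucket_eq_filt defs columns hnd hoth p hp])
    rw [hf]
    refine List.map_congr_left (fun p hp => ?_)
    rw [show ((fun k => (k, filt defs columns k)) ∘ Prod.fst) p
        = (p.1, filt defs columns p.1) from rfl,
      ← bucket_eq_filt defs columns hnd hoth p (List.mem_filter.mp hp).1]
  rw [hother, hgd, List.nil_append, List.filter_append, List.map_append]
  cases hE : (filt defs columns "other").isEmpty with
  | true =>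
    rw [if_pos rfl, hitems, List.filter_cons, List.filter_nil, hE]
    simp
  | false =>
    rw [if_neg (by simp), PySem.Dict.items_insert_of_not_contains St.2 _ hcont, hitems,
      List.filter_cons, List.filter_nil, hE]
    simp



-- ===== VERDICT (by name: the statement is the Claim_ definition above) =====
set_option maxHeartbeats 1000000 in
theorem categorise_columns_spec : Claim_equal_categorise_columns := by
  intro columns cc _ hpre
  unfold Pre_categorise_columns at hpre
  obtain ⟨hnd, hoth⟩ := hpre
  show categorise_columns columns cc = categorise_columns_alt columns cc
  cases cc with
  | none =>
      dsimp only [categorise_columns, categorise_columns_alt]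
      exact core getDefaultCategories columns (by decide) (by decide)
  | some l => cases l with
    | nil =>
        dsimp only [categorise_columns, categorise_columns_alt]
        exact core getDefaultCategories columns (by decide) (by decide)
    | cons p rest =>
        dsimp only [categorise_columns, categorise_columns_alt]
        exact core (p :: rest) columns hnd hoth
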